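-- pv_equiv track=rewrite | github.com/Q-romantic/MY_object | CASE/working/ok/匈牙利算法.py | juge
-- ===== SOURCE A (Python) =====
-- def transpose(array):
--     # arr = list(map(lambda x: list(x), zip(*array)))
--     # arr = list(map(list, zip(*array)))
--     # arr = [list(i) for i in zip(*array)]
--     # 方法四
--     arr = [[] for _ in range(len(array))]
--     for i in array:
--         for j in range(len(i)):
--             arr[j].append(i[j])
--     return arr
--
-- def juge(array, flag=True):  # 判断每行每列是否存在唯一圈 0 ，即每行每列只存在 'o'
--     for i in array:
--         if i.count('o') == 1:
--             flag = True
--         else: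
--             flag = False
--             return flag
--     for i in transpose(array):
--         if i.count('o') == 1:
--             flag = True
--         else:
--             flag = False
--             return flag
--     return flag
-- ===== SOURCE B (Python) =====
-- def juge(array, flag=True):
--     if not array:
--         return flag
--     pos = []
--     for row in array:
--         if row.count('o') != 1:
--             return False
--         pos.append(row.index('o'))
--     return sorted(pos) == list(range(len(array)))
-- ===== Notes on version B (the rewrite author's own statement) =====
-- stated objective: alternative
-- what changed: B never builds columns at all: it records the index of each row's unique 'o' and decides the column condition by comparing the sorted index list with range(len(array)) (a permutation test), instead of A's transpose-then-count-per-column.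
import Mathlib
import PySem

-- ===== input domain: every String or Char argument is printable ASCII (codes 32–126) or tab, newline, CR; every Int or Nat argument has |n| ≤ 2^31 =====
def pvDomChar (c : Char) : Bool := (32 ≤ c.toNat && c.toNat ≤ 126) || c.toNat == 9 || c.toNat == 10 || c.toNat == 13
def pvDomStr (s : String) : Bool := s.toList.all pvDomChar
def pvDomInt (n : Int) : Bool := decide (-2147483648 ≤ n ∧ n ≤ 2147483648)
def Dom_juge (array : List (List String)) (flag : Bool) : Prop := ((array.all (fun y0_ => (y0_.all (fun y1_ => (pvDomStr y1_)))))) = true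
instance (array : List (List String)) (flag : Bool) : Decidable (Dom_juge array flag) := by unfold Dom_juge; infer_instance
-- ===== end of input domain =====

-- B replaces A's transpose-then-count column check by a permutation test: it records each row's unique 'o' index and compares the sorted index list with range(len(array)).


-- modify the element at index j in place (no-op out of range; inside Pre_ every used index is in range)
def modAt {α : Type} (l : List α) (j : Int) (f : α → α) : List α :=
  match l with
  | [] => []
  | x :: xs => if j = 0 then f x :: xs else x :: modAt xs (j - 1) f

-- ===== PORT A =====
-- transpose: arr = [[] for _ in range(len(array))]; arr[j].append(i[j]) for each row i
def transposeA (array : List (List String)) : List (List String) :=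
  array.foldl
    (fun arr i =>
      (PySem.List.enumerate i).foldl (fun arr jc => modAt arr jc.1 (· ++ [jc.2])) arr)
    (List.replicate array.length [])

-- a loop body with early return: .inl = returned value, .inr = flag after falling through
def loopA : List (List String) → Bool → Sum Bool Bool
  | [], flag => .inr flag
  | i :: rest, _ =>
      if PySem.List.count i "o" = 1 then loopA rest true else .inl false

def juge (array : List (List String)) (flag : Bool) : Bool :=
  match loopA array flag with
  | .inl r => r
  | .inr flag1 =>
    match loopA (transposeA array) flag1 with
    | .inl r => r
    | .inr flag2 => flag2

-- ===== PORT B =====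
-- row.index('o'): guarded by count = 1, so index? is always some here (getD 0 is never the default)
def posOf (r : List String) : Int := ((PySem.List.index? r "o").getD 0 : Nat)

-- the row loop with early return: none = returned False, some pos = fell through with the index list
def loopB : List (List String) → List Int → Option (List Int)
  | [], pos => some pos
  | r :: rest, pos =>
      if PySem.List.count r "o" ≠ 1 then none
      else loopB rest (pos ++ [posOf r])

def juge_alt (array : List (List String)) (flag : Bool) : Bool :=
  if array.isEmpty then flag
  else
    match loopB array [] with
    | none => false
    | some pos =>
        decide (PySem.List.sorted pos (fun x => x) = PySem.List.pyRange 0 (PySem.List.len array) 1)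

-- ===== PRECONDITION & SPEC =====
-- Pre_ excludes exactly the inputs where A raises IndexError: all rows have exactly one 'o'
-- (so the transpose is reached) and some row is longer than len(array).
def Pre_juge (array : List (List String)) (flag : Bool) : Prop :=
  (∃ i ∈ array, PySem.List.count i "o" ≠ 1) ∨ (∀ i ∈ array, i.length ≤ array.length)
instance (array : List (List String)) (flag : Bool) : Decidable (Pre_juge array flag) := by
  unfold Pre_juge; infer_instance
def pvWitness_juge : List (List String) × Bool := ([["o", "x"], ["x", "o"]], true)

def Spec_juge (array : List (List String)) (flag : Bool) (out : Bool) : Prop := out = juge_alt array flag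
instance (array : List (List String)) (flag : Bool) (out : Bool) : Decidable (Spec_juge array flag out) := by unfold Spec_juge; infer_instance

-- ===== CLAIM (what is proved, stated in full; the proofs are below) =====
def Claim_equal_juge : Prop := ∀ (array : List (List String)) (flag : Bool), Dom_juge array flag → Pre_juge array flag → Spec_juge array flag (juge array flag)

-- ===== LEMMAS AND PROOFS =====

-- the column j of A's transpose, as a flat extraction (rows shorter than j+1 contribute nothing)
def colL (array : List (List String)) (k : Nat) : List String :=
  array.flatMap (fun r => (r[k]?).toList)

theorem modAt_getElem? {α : Type} (f : α → α) :
    ∀ (l : List α) (j : Int) (k : Nat),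
      (modAt l j f)[k]? = if j = (k : Int) then (l[k]?).map f else l[k]? := by
  intro l
  induction l with
  | nil => intro j k; simp [modAt]
  | cons x xs ih =>
      intro j k
      by_cases hj : j = 0
      · cases k <;> simp [modAt, hj] <;> omega
      · cases k with
        | zero => simp [modAt, hj]
        | succ m =>
            have := ih (j - 1) m
            simp only [modAt, if_neg hj, List.getElem?_cons_succ, this]
            by_cases h : j = (m : Int) + 1
            · rw [if_pos (by omega), if_pos (by push_cast; omega)]
            · rw [if_neg (by omega), if_neg (by push_cast; omega)]

theorem enum_foldl_get (i : List String) :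
    ∀ (s : Nat) (arr : List (List String)) (k : Nat),
      ((PySem.List.enumerate i (s : Int)).foldl (fun a jc => modAt a jc.1 (· ++ [jc.2])) arr)[k]? =
        if s ≤ k then (arr[k]?).map (· ++ (i[k - s]?).toList) else arr[k]? := by
  induction i with
  | nil =>
      intro s arr k
      cases h : arr[k]? <;> simp [PySem.List.enumerate_nil, h]
  | cons x xs ih =>
      intro s arr k
      have hcast : (s : Int) + 1 = ((s + 1 : Nat) : Int) := by push_cast; ring
      rw [PySem.List.enumerate_cons, List.foldl_cons, hcast, ih (s + 1)]
      rcases Nat.lt_trichotomy k s with hk | hk | hk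
      · rw [if_neg (by omega), if_neg (by omega),
          modAt_getElem? _ arr (s : Int) k, if_neg (by omega)]
      · subst hk
        rw [if_neg (by omega), if_pos (le_refl k),
          modAt_getElem? _ arr (k : Int) k, if_pos rfl]
        simp
      · rw [if_pos (by omega), if_pos (by omega),
          modAt_getElem? _ arr (s : Int) k, if_neg (by omega)]
        have h1 : k - s = (k - (s + 1)) + 1 := by omega
        rw [h1, List.getElem?_cons_succ]

theorem outer_foldl_get (rows : List (List String)) :
    ∀ (arr : List (List String)) (k : Nat),
      (rows.foldl (fun arr i =>
          (PySem.List.enumerate i).foldl (fun a jc => modAt a jc.1 (· ++ [jc.2])) arr) arr)[k]? =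
        (arr[k]?).map (· ++ colL rows k) := by
  induction rows with
  | nil =>
      intro arr k
      cases h : arr[k]? <;> simp [colL, h]
  | cons r rows ih =>
      intro arr k
      rw [List.foldl_cons, ih]
      have h0 : ((PySem.List.enumerate r).foldl (fun a jc => modAt a jc.1 (· ++ [jc.2])) arr)[k]?
          = (arr[k]?).map (· ++ (r[k]?).toList) := by
        have := enum_foldl_get r 0 arr k
        simpa [PySem.List.enumerate] using this
      rw [h0]
      cases h : arr[k]? <;> simp [colL, h, List.append_assoc]

theorem transposeA_getElem? (array : List (List String)) (k : Nat) :
    (transposeA array)[k]? = if k < array.length then some (colL array k) else none := by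
  unfold transposeA
  rw [outer_foldl_get]
  by_cases hk : k < array.length
  · rw [if_pos hk]
    simp [List.getElem?_replicate, hk]
  · rw [if_neg hk]
    simp [List.getElem?_replicate, hk]

theorem transposeA_length (array : List (List String)) :
    (transposeA array).length = array.length := by
  apply le_antisymm
  · have h := transposeA_getElem? array array.length
    rw [if_neg (by omega)] at h
    exact List.getElem?_eq_none_iff.mp h
  · by_contra h
    push_neg at h
    have h2 := transposeA_getElem? array (transposeA array).length
    rw [if_pos h] at h2
    simp [List.getElem?_eq_none_iff.mpr (le_refl _)] at h2

-- the loop with early return, characterised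
theorem loopA_all (l : List (List String)) (f : Bool)
    (h : ∀ i ∈ l, List.count "o" i = 1) :
    loopA l f = .inr (if l.isEmpty then f else true) := by
  induction l generalizing f with
  | nil => simp [loopA]
  | cons x xs ih =>
      have hx : List.count "o" x = 1 := h x (by simp)
      have hxs : ∀ i ∈ xs, List.count "o" i = 1 := fun i hi => h i (by simp [hi])
      cases xs with
      | nil => simp [loopA, hx]
      | cons y ys => simpa [loopA, hx] using ih true hxs

theorem loopA_bad (l : List (List String)) (f : Bool)
    (h : ∃ i ∈ l, List.count "o" i ≠ 1) :
    loopA l f = .inl false := by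
  induction l generalizing f with
  | nil => simp at h
  | cons x xs ih =>
      by_cases hx : List.count "o" x = 1
      · have hxs : ∃ i ∈ xs, List.count "o" i ≠ 1 := by
          obtain ⟨i, hi, hne⟩ := h
          cases hi with
          | head => exact absurd hx hne
          | tail _ hm => exact ⟨i, hm, hne⟩
        simp [loopA, hx, ih true hxs]
      · simp [loopA, hx]

theorem loopA_result (l : List (List String)) (f : Bool) :
    loopA l f = if l.all (fun i => List.count "o" i = 1)
                then .inr (if l.isEmpty then f else true) else .inl false := by
  by_cases h : l.all (fun i => List.count "o" i = 1)
  · rw [if_pos h]; exact loopA_all l f (by simpa [List.all_eq_true] using h)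
  · rw [if_neg h]
    refine loopA_bad l f ?_
    simpa [List.all_eq_true] using h

theorem loopB_result (l : List (List String)) :
    ∀ (pos : List Int),
      loopB l pos = if l.all (fun i => List.count "o" i = 1)
                    then some (pos ++ l.map posOf) else none := by
  induction l with
  | nil => intro pos; simp [loopB]
  | cons r rest ih =>
      intro pos
      by_cases hr : List.count "o" r = 1
      · simp [loopB, PySem.List.count_eq, hr, ih]
      · simp [loopB, PySem.List.count_eq, hr]

-- a row with exactly one 'o': position k holds 'o' iff the index of 'o' is k
theorem count_one_get (r : List String) (h : List.count "o" r = 1) (k : Nat) :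
    (r[k]? = some "o") ↔ PySem.List.index? r "o" = some k := by
  induction r generalizing k with
  | nil => simp at h
  | cons x xs ih =>
      by_cases hx : x = "o"
      · subst hx
        have h' : List.count "o" xs + 1 = 1 := by simpa [List.count_cons] using h
        have hxs : "o" ∉ xs := List.count_eq_zero.mp (by omega)
        cases k with
        | zero => rw [PySem.List.index?_cons_self]; simp
        | succ m =>
            rw [PySem.List.index?_cons_self]
            simp only [List.getElem?_cons_succ]
            constructor
            · intro hg
              exact absurd (List.mem_of_getElem? hg) hxs
            · intro hg; simp at hg
      · have hxs : List.count "o" xs = 1 := by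
          simpa [List.count_cons, hx] using h
        cases k with
        | zero =>
            rw [PySem.List.index?_cons_of_ne xs hx]
            constructor
            · intro hg
              exact absurd (by injection hg) hx
            · intro hg
              simp only [Option.map_eq_some_iff] at hg
              obtain ⟨a, -, ha⟩ := hg
              omega
        | succ m =>
            rw [PySem.List.index?_cons_of_ne xs hx]
            simp only [List.getElem?_cons_succ, ih hxs m, Option.map_eq_some_iff]
            constructor
            · intro hg; exact ⟨m, hg, rfl⟩
            · rintro ⟨a, ha, hma⟩
              have : a = m := by omega
              subst this; exact ha

theorem posOf_spec (r : List String) (h : List.count "o" r = 1) :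
    ∃ j : Nat, PySem.List.index? r "o" = some j ∧ posOf r = (j : Int) ∧ j < r.length := by
  have hmem : "o" ∈ r := List.count_pos_iff.mp (by omega)
  obtain ⟨j, hj⟩ := Option.isSome_iff_exists.mp ((PySem.List.index?_isSome_iff r "o").mpr hmem)
  obtain ⟨hjl, -, -⟩ := PySem.List.getElem_of_index?_eq_some hj
  exact ⟨j, hj, by unfold posOf; rw [hj]; simp, hjl⟩

-- count of 'o' in column k = count of k among the rows' 'o'-positions (each row has exactly one 'o')
theorem col_count (array : List (List String)) (k : Nat)
    (h : ∀ r ∈ array, List.count "o" r = 1) :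
    List.count "o" (colL array k) = List.count (k : Int) (array.map posOf) := by
  induction array with
  | nil => simp [colL]
  | cons r rest ih =>
      have hr := h r (by simp)
      have hrest := ih (fun x hx => h x (by simp [hx]))
      obtain ⟨j, hj, hpos, -⟩ := posOf_spec r hr
      have hhead : List.count "o" ((r[k]?).toList) = if posOf r = (k : Int) then 1 else 0 := by
        by_cases hjk : j = k
        · subst hjk
          have : r[j]? = some "o" := (count_one_get r hr j).mpr hj
          simp [this, hpos]
        · have : r[k]? ≠ some "o" := fun hc => by
            rw [count_one_get r hr k] at hc
            rw [hc] at hj; simp at hj; omega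
          have hne : posOf r ≠ (k : Int) := by rw [hpos]; exact_mod_cast fun hc => hjk (by exact_mod_cast hc)
          cases hg : r[k]? with
          | none => simp [hg, hne]
          | some v =>
              have : v ≠ "o" := fun hv => this (by rw [hg, hv])
              simp [hg, this, hne]
      rw [colL, List.flatMap_cons, List.count_append, List.map_cons, List.count_cons]
      rw [show (rest.flatMap fun r => (r[k]?).toList) = colL rest k from rfl, hrest, hhead]
      by_cases hp : posOf r = (k : Int) <;> simp [hp, Nat.add_comm]

-- the permutation test: every column index 0..n-1 occurs exactly once among positions all lying in [0,n)
theorem perm_range_iff (pos : List Int) (n : Nat)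
    (hin : ∀ p ∈ pos, 0 ≤ p ∧ p < (n : Int)) :
    (∀ k : Nat, k < n → List.count ((k : Nat) : Int) pos = 1) ↔
      pos.Perm (PySem.List.pyRange 0 (n : Int) 1) := by
  have hnd := PySem.List.nodup_pyRange_one (a := (0 : Int)) (b := (n : Int))
  constructor
  · intro hc
    rw [List.perm_iff_count]
    intro a
    by_cases ha : 0 ≤ a ∧ a < (n : Int)
    · have hk : a = ((a.toNat : Nat) : Int) := by omega
      have hcnt : List.count a pos = 1 := by rw [hk]; exact hc a.toNat (by omega)
      have hmem : a ∈ PySem.List.pyRange 0 (n : Int) 1 := by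
        rw [PySem.List.mem_pyRange_one]; omega
      rw [hcnt, List.count_eq_one_of_mem hnd hmem]
    · have h1 : List.count a pos = 0 := by
        rw [List.count_eq_zero]
        intro hm; exact ha (hin a hm)
      have h2 : List.count a (PySem.List.pyRange 0 (n : Int) 1) = 0 := by
        rw [List.count_eq_zero, PySem.List.mem_pyRange_one]
        omega
      rw [h1, h2]
  · intro hp k hk
    rw [List.perm_iff_count.mp hp]
    refine List.count_eq_one_of_mem hnd ?_
    rw [PySem.List.mem_pyRange_one]
    constructor
    · exact_mod_cast Nat.zero_le k
    · exact_mod_cast hk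

-- ===== VERDICT (by name: the statement is the Claim_ definition above) =====
theorem juge_spec : Claim_equal_juge := by
  intro array flag _ hpre
  unfold Spec_juge
  by_cases hemp : array.isEmpty
  · have h0 : array = [] := List.isEmpty_iff.mp hemp
    subst h0
    simp [juge, juge_alt, loopA, transposeA]
  · by_cases hrows : array.all (fun i => List.count "o" i = 1)
    · -- all rows pass
      have hall : ∀ r ∈ array, List.count "o" r = 1 := by
        simpa [List.all_eq_true] using hrows
      have hlen : ∀ r ∈ array, r.length ≤ array.length := by
        rcases hpre with h | h
        · obtain ⟨i, hi, hne⟩ := h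
          exact absurd (by simpa [PySem.List.count_eq] using hall i hi) hne
        · exact h
      -- A's value: the transpose column check
      have h1 : loopA array flag = .inr true := by
        rw [loopA_result, if_pos hrows, if_neg hemp]
      have h2 := loopA_result (transposeA array) true
      have hA : juge array flag
          = (transposeA array).all (fun i => List.count "o" i = 1) := by
        unfold juge
        rw [h1]
        dsimp only
        rw [h2]
        by_cases hc : (transposeA array).all (fun i => List.count "o" i = 1) <;>
          simp [hc]
      -- B's value: the sorted-positions check
      have hB : juge_alt array flag
          = decide (PySem.List.sorted (array.map posOf) (fun x => x)
              = PySem.List.pyRange 0 (PySem.List.len array) 1) := by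
        unfold juge_alt
        rw [if_neg hemp, loopB_result, if_pos hrows]
        simp
      -- the two conditions are equivalent
      have hin : ∀ p ∈ array.map posOf, 0 ≤ p ∧ p < (array.length : Int) := by
        intro p hp
        obtain ⟨r, hr, hpr⟩ := List.mem_map.mp hp
        obtain ⟨j, -, hpos, hjl⟩ := posOf_spec r (hall r hr)
        have := hlen r hr
        subst hpr
        rw [hpos]
        constructor
        · exact_mod_cast Nat.zero_le j
        · exact_mod_cast lt_of_lt_of_le hjl this
      have hiff1 : ((transposeA array).all (fun i => List.count "o" i = 1) = true)
          ↔ (∀ k : Nat, k < array.length → List.count "o" (colL array k) = 1) := by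
        rw [List.all_eq_true]
        constructor
        · intro h k hk
          have hg : (transposeA array)[k]? = some (colL array k) := by
            rw [transposeA_getElem?, if_pos hk]
          have hmem : colL array k ∈ transposeA array := List.mem_of_getElem? hg
          simpa using h _ hmem
        · intro h x hx
          obtain ⟨k, hk, hxk⟩ := List.getElem_of_mem hx
          have hg : (transposeA array)[k]? = some (colL array k) := by
            rw [transposeA_getElem?, if_pos (by rwa [transposeA_length] at hk)]
          rw [List.getElem?_eq_getElem hk, hxk] at hg
          have : x = colL array k := by injection hg
          subst this
          simpa using h k (by rwa [transposeA_length] at hk)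
      have hiff2 : (∀ k : Nat, k < array.length → List.count "o" (colL array k) = 1)
          ↔ (array.map posOf).Perm (PySem.List.pyRange 0 (array.length : Int) 1) := by
        rw [← perm_range_iff (array.map posOf) array.length hin]
        constructor <;> intro h k hk <;>
          [rw [← col_count array k hall]; rw [col_count array k hall]] <;> exact h k hk
      have hiff3 : (array.map posOf).Perm (PySem.List.pyRange 0 (array.length : Int) 1)
          ↔ (PySem.List.sorted (array.map posOf) (fun x => x)
              = PySem.List.pyRange 0 (array.length : Int) 1) := by
        constructor
        · intro hp
          exact PySem.List.sorted_eq_of_perm_of_pairwise_lt _ _ _ hp.symm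
            (PySem.List.pairwise_lt_pyRange_one 0 (array.length : Int))
        · intro hs
          have hperm := PySem.List.sorted_perm (array.map posOf) (fun x => x) false
          rw [hs] at hperm
          exact hperm.symm
      rw [hA, hB]
      rw [Bool.eq_iff_iff]
      simp only [decide_eq_true_eq, PySem.List.len_eq]
      exact hiff1.trans (hiff2.trans hiff3)
    · -- some row fails: both return false
      have h1 : loopA array flag = .inl false := by
        rw [loopA_result, if_neg hrows]
      have hB : juge_alt array flag = false := by
        unfold juge_alt
        rw [if_neg hemp, loopB_result, if_neg hrows]
      rw [hB]
      unfold juge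
      rw [h1]
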